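-- pv_equiv track=rewrite | github.com/postBG/DSC | HW4/P10.py | P10
-- ===== SOURCE A (Python) =====
-- def P10(words: set, query_word: str) -> bool:
--     candidates = [w for w in words if len(query_word) == len(w)]
--     for w in candidates:
--         diff = 0
--         for c1, c2 in zip(w, query_word):
--             if c1 != c2:
--                 diff += 1
--         if diff == 1:
--             return True
--     return False
-- ===== SOURCE B (Python) =====
-- def P10(words: set, query_word: str) -> bool:
--     # Probe set membership of every Hamming-distance-1 neighbour of query_word
--     # over the alphabet of characters occurring in words.
--     alphabet = set()
--     for w in words:
--         alphabet.update(w)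
--     for i in range(len(query_word)):
--         for c in alphabet:
--             if c != query_word[i] and query_word[:i] + c + query_word[i + 1:] in words:
--                 return True
--     return False
-- ===== Notes on version B (the rewrite author's own statement) =====
-- stated objective: alternative
-- what changed: Instead of scanning every word and counting character differences, B collects the alphabet of all words and tests set membership of each distance-1 neighbour of query_word.
import Mathlib
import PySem

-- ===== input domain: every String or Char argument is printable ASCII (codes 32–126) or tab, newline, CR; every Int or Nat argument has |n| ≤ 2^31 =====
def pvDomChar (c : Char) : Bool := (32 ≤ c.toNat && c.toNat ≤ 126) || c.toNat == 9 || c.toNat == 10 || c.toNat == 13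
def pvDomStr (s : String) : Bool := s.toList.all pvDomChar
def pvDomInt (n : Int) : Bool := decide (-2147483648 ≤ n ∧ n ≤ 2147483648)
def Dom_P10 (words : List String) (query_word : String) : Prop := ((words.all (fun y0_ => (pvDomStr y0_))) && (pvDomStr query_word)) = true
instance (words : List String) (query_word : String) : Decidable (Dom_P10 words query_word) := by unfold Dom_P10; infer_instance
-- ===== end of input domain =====

-- B replaces A's scan of all words (counting per-word character differences) by membership
-- tests of each Hamming-distance-1 neighbour of query_word over the alphabet of the words;
-- same result, different algorithm ("alternative", no speed claim).

-- ===== PORT A =====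
-- the inner 'for c1, c2 in zip(w, query_word): if c1 != c2: diff += 1' loop
def pvDiffA (w q : List Char) : Nat :=
  (w.zip q).foldl (fun d p => if p.1 ≠ p.2 then d + 1 else d) 0

def P10 (words : List String) (query_word : String) : Bool :=
  let candidates := words.filter (fun w => query_word.toList.length == w.toList.length)
  candidates.any (fun w => pvDiffA w.toList query_word.toList == 1)

-- ===== PORT B =====
-- 'alphabet.update(w)' loop over words
def pvAlphabet (words : List String) : PySem.Set Char :=
  words.foldl (fun s w => PySem.Set.update s w.toList) PySem.Set.empty

-- query_word[:i] + c + query_word[i+1:]  (i ≥ 0, so the slices are take/drop exactly)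
def pvNeighbor (q : List Char) (i : Nat) (c : Char) : String :=
  String.ofList (q.take i ++ c :: q.drop (i + 1))

def P10_alt (words : List String) (query_word : String) : Bool :=
  let alphabet := pvAlphabet words
  let q := query_word.toList
  (List.range q.length).any (fun i =>
    alphabet.any (fun c =>
      c != q.getD i ' ' && words.contains (pvNeighbor q i c)))

-- ===== PRECONDITION & SPEC =====
def Spec_P10 (words : List String) (query_word : String) (out : Bool) : Prop := out = P10_alt words query_word
instance (words : List String) (query_word : String) (out : Bool) : Decidable (Spec_P10 words query_word out) := by unfold Spec_P10; infer_instance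

-- ===== CLAIM (what is proved, stated in full; the proofs are below) =====
def Claim_equal_P10 : Prop := ∀ (words : List String) (query_word : String), Dom_P10 words query_word → Spec_P10 words query_word (P10 words query_word)

-- ===== LEMMAS AND PROOFS =====

theorem pvDiffA_acc (ps : List (Char × Char)) (d : Nat) :
    ps.foldl (fun d p => if p.1 ≠ p.2 then d + 1 else d) d
      = d + ps.foldl (fun d p => if p.1 ≠ p.2 then d + 1 else d) 0 := by
  induction ps generalizing d with
  | nil => simp
  | cons p ps ih =>
    simp only [List.foldl_cons]
    rw [ih, ih (if p.1 ≠ p.2 then 0 + 1 else 0)]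
    split_ifs <;> omega

theorem pvDiffA_cons (a b : Char) (l q : List Char) :
    pvDiffA (a :: l) (b :: q) = (if a = b then 0 else 1) + pvDiffA l q := by
  simp only [pvDiffA, List.zip_cons_cons, List.foldl_cons]
  rw [pvDiffA_acc]
  split_ifs with h h1 <;> simp_all

theorem pvDiffA_zero (l q : List Char) (h : l.length = q.length) :
    pvDiffA l q = 0 ↔ l = q := by
  induction l generalizing q with
  | nil => cases q <;> simp_all [pvDiffA]
  | cons a l ih =>
    cases q with
    | nil => simp at h
    | cons b q =>
      rw [pvDiffA_cons]
      simp only [List.length_cons, Nat.add_right_cancel_iff] at h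
      constructor
      · intro h0
        split_ifs at h0 with hab
        · simp_all [(ih q h).mp (by omega : pvDiffA l q = 0)]
        · omega
      · intro he
        injection he with h1 h2
        subst h1; subst h2
        simp [(ih l rfl).mpr rfl]

-- characterisation of "exactly one differing position"
theorem pvDiffA_one_iff (l q : List Char) (h : l.length = q.length) :
    pvDiffA l q = 1 ↔
      ∃ i c, i < q.length ∧ c ≠ q.getD i ' ' ∧ l = q.take i ++ c :: q.drop (i + 1) := by
  induction l generalizing q with
  | nil =>
    cases q <;> simp_all [pvDiffA]
  | cons a l ih =>
    cases q with
    | nil => simp at h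
    | cons b q =>
      simp only [List.length_cons, Nat.add_right_cancel_iff] at h
      rw [pvDiffA_cons]
      constructor
      · intro h1
        split_ifs at h1 with hab
        · -- a = b, one diff further in
          obtain ⟨i, c, hi, hc, hl⟩ := (ih q h).mp (by omega)
          exact ⟨i + 1, c, by simpa using hi, by simpa using hc, by simp [hl, hab]⟩
        · -- a ≠ b, rest equal
          have hlq : l = q := (pvDiffA_zero l q h).mp (by omega)
          exact ⟨0, a, by simp, by simpa using hab, by simp [hlq]⟩
      · rintro ⟨i, c, hi, hc, hl⟩
        cases i with
        | zero =>
          simp only [List.take_zero, List.drop_succ_cons, List.drop_zero, List.nil_append,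
            List.cons.injEq] at hl
          obtain ⟨rfl, rfl⟩ := hl
          simp only [List.getD_cons_zero] at hc
          rw [if_neg hc, (pvDiffA_zero l l rfl).mpr rfl]
        | succ j =>
          simp only [List.take_succ_cons, List.drop_succ_cons, List.cons_append,
            List.cons.injEq] at hl
          obtain ⟨rfl, hl⟩ := hl
          simp only [List.getD_cons_succ] at hc
          simp only [List.length_cons] at hi
          rw [if_pos rfl, (ih q h).mpr ⟨j, c, by omega, hc, hl⟩]

theorem mem_pvAlphabet_aux (words : List String) (s : List Char) (c : Char) :
    c ∈ words.foldl (fun s w => PySem.Set.update s w.toList) s ↔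
      c ∈ s ∨ ∃ w ∈ words, c ∈ w.toList := by
  induction words generalizing s with
  | nil => simp
  | cons w ws ih =>
    simp only [List.foldl_cons, ih, PySem.Set.mem_update, List.mem_cons]
    constructor
    · rintro ((h | h) | ⟨v, hv, hc⟩)
      · exact Or.inl h
      · exact Or.inr ⟨w, Or.inl rfl, h⟩
      · exact Or.inr ⟨v, Or.inr hv, hc⟩
    · rintro (h | ⟨v, hv | hv, hc⟩)
      · exact Or.inl (Or.inl h)
      · exact Or.inl (Or.inr (hv ▸ hc))
      · exact Or.inr ⟨v, hv, hc⟩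

theorem mem_pvAlphabet (words : List String) (c : Char) :
    c ∈ pvAlphabet words ↔ ∃ w ∈ words, c ∈ w.toList := by
  unfold pvAlphabet
  rw [mem_pvAlphabet_aux]
  simp [PySem.Set.empty]

theorem P10_true_iff (words : List String) (query_word : String) :
    P10 words query_word = true ↔
      ∃ w ∈ words, w.toList.length = query_word.toList.length ∧
        pvDiffA w.toList query_word.toList = 1 := by
  simp only [P10, List.any_eq_true, List.mem_filter, beq_iff_eq]
  constructor
  · rintro ⟨w, ⟨hw, hlen⟩, hd⟩; exact ⟨w, hw, hlen.symm, hd⟩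
  · rintro ⟨w, hw, hlen, hd⟩; exact ⟨w, ⟨hw, hlen.symm⟩, by simpa using hd⟩

theorem P10_alt_true_iff (words : List String) (query_word : String) :
    P10_alt words query_word = true ↔
      ∃ i, i < query_word.toList.length ∧ ∃ c ∈ pvAlphabet words,
        c ≠ query_word.toList.getD i ' ' ∧ pvNeighbor query_word.toList i c ∈ words := by
  simp [P10_alt, List.any_eq_true]

-- ===== VERDICT (by name: the statement is the Claim_ definition above) =====
theorem P10_spec : Claim_equal_P10 := by
  intro words query_word _
  unfold Spec_P10
  rw [Bool.eq_iff_iff, P10_true_iff, P10_alt_true_iff]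
  constructor
  · rintro ⟨w, hw, hlen, hd⟩
    obtain ⟨i, c, hi, hc, hl⟩ := (pvDiffA_one_iff w.toList query_word.toList hlen).mp hd
    refine ⟨i, hi, c, ?_, hc, ?_⟩
    · exact (mem_pvAlphabet words c).mpr ⟨w, hw, by rw [hl]; simp⟩
    · have : pvNeighbor query_word.toList i c = w := by
        rw [pvNeighbor, ← hl, String.ofList_toList]
      rwa [this]
  · rintro ⟨i, hi, c, _, hne, hmem⟩
    have hlen : (pvNeighbor query_word.toList i c).toList.length
        = query_word.toList.length := by
      have hi' : i < query_word.length := by simpa using hi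
      simp [pvNeighbor]; omega
    refine ⟨pvNeighbor query_word.toList i c, hmem, hlen, ?_⟩
    exact (pvDiffA_one_iff _ query_word.toList hlen).mpr
      ⟨i, c, hi, hne, by simp [pvNeighbor]⟩
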